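-- pv_equiv track=rewrite | github.com/IMUJason/raise-cut-root-cutsel-repro | src/plan5/scip_cutsel.py | reorder_dense_candidates_with_quota
-- ===== SOURCE A (Python) =====
-- def reorder_dense_candidates_with_quota(
--     ranked_indices: list[int],
--     families: list[str],
--     dominant_family: str,
--     dominant_quota: int,
-- ) -> list[int]:
--     if dominant_quota <= 0 or not ranked_indices:
--         return list(ranked_indices)
--     leading: list[int] = []
--     deferred: list[int] = []
--     dominant_taken = 0
--     for idx in ranked_indices:
--         if families[idx] == dominant_family and dominant_taken >= dominant_quota:
--             deferred.append(idx)
--             continue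
--         leading.append(idx)
--         if families[idx] == dominant_family:
--             dominant_taken += 1
--     return leading + deferred
-- ===== SOURCE B (Python) =====
-- def reorder_dense_candidates_with_quota(
--     ranked_indices: list[int],
--     families: list[str],
--     dominant_family: str,
--     dominant_quota: int,
-- ) -> list[int]:
--     if dominant_quota <= 0 or not ranked_indices:
--         return list(ranked_indices)
--     dom = [i for i in ranked_indices if families[i] == dominant_family]
--     deferred = dom[dominant_quota:]
--     r = len(deferred)
--     leading = []
--     for i in reversed(ranked_indices):
--         if r and families[i] == dominant_family:
--             r -= 1
--         else:
--             leading.append(i)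
--     leading.reverse()
--     return leading + deferred
-- ===== Notes on version B (the rewrite author's own statement) =====
-- stated objective: alternative
-- what changed: A's single forward pass with a running dominant-taken counter and two accumulators is replaced by computing deferred as a slice of the filtered dominant-element list and leading as a reverse pass that removes the last len(dom)-quota dominant occurrences with a decrementing budget.
import Mathlib
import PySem

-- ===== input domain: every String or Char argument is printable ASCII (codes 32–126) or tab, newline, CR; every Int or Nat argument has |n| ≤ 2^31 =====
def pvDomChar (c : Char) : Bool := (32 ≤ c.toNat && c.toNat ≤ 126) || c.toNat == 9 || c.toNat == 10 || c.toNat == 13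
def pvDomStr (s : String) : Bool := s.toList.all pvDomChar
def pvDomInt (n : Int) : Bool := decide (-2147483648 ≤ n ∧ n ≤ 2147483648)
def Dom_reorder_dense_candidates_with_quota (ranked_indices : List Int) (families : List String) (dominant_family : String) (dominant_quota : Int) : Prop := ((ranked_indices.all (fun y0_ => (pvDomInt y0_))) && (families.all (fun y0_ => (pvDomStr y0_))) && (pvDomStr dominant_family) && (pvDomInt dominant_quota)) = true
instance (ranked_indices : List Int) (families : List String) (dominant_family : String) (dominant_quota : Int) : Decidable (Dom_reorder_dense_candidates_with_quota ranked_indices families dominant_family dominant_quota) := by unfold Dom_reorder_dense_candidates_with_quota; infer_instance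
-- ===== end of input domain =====

-- B replaces A's single pass with counter by: deferred = slice of the filtered dominant list,
-- leading = a reverse pass removing the last (len(dom) - quota) dominant occurrences (alternative decomposition, same cost).

-- ===== PORT A =====
-- families[idx] is ported as (pyGet? families idx).getD "": exact whenever the index is in range;
-- out-of-range indices (Python IndexError) are excluded by Pre_.
def pvStepA (families : List String) (dominant_family : String) (dominant_quota : Int)
    (s : List Int × List Int × Int) (idx : Int) : List Int × List Int × Int :=
  if ((PySem.List.pyGet? families idx).getD "" == dominant_family) && decide (dominant_quota ≤ s.2.2) then
    (s.1, s.2.1 ++ [idx], s.2.2)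
  else
    (s.1 ++ [idx], s.2.1,
     if (PySem.List.pyGet? families idx).getD "" == dominant_family then s.2.2 + 1 else s.2.2)

def reorder_dense_candidates_with_quota (ranked_indices : List Int) (families : List String) (dominant_family : String) (dominant_quota : Int) : List Int :=
  if dominant_quota ≤ 0 ∨ ranked_indices = [] then ranked_indices
  else
    let st := ranked_indices.foldl (pvStepA families dominant_family dominant_quota) ([], [], 0)
    st.1 ++ st.2.1

-- ===== PORT B =====
-- the loop 'for i in reversed(ranked_indices): …' of Source B (kept elements in traversal order)
def pvGoB (families : List String) (dominant_family : String) : List Int → Int → List Int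
  | [], _ => []
  | i :: l, r =>
    if decide (r ≠ 0) && ((PySem.List.pyGet? families i).getD "" == dominant_family) then
      pvGoB families dominant_family l (r - 1)
    else
      i :: pvGoB families dominant_family l r

def reorder_dense_candidates_with_quota_alt (ranked_indices : List Int) (families : List String) (dominant_family : String) (dominant_quota : Int) : List Int :=
  if dominant_quota ≤ 0 ∨ ranked_indices = [] then ranked_indices
  else
    let dom := ranked_indices.filter (fun i => (PySem.List.pyGet? families i).getD "" == dominant_family)
    let deferred := PySem.List.slice dom (some dominant_quota) none
    let r : Int := deferred.length
    let leading := (pvGoB families dominant_family ranked_indices.reverse r).reverse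
    leading ++ deferred

-- ===== PRECONDITION & SPEC =====
-- Pre_ excludes exactly the inputs where Python A raises IndexError: some idx in ranked_indices
-- out of range for families (the loop body indexes families[idx]); with quota ≤ 0 or an empty list A never indexes.
def Pre_reorder_dense_candidates_with_quota (ranked_indices : List Int) (families : List String) (dominant_family : String) (dominant_quota : Int) : Prop :=
  dominant_quota ≤ 0 ∨ ranked_indices = [] ∨ ∀ idx ∈ ranked_indices, PySem.Raise.InRange families.length idx
instance (ranked_indices : List Int) (families : List String) (dominant_family : String) (dominant_quota : Int) : Decidable (Pre_reorder_dense_candidates_with_quota ranked_indices families dominant_family dominant_quota) := by unfold Pre_reorder_dense_candidates_with_quota; infer_instance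
def pvWitness_reorder_dense_candidates_with_quota : List Int × List String × String × Int :=
  ([0, 1, 2, 0], ["a", "b", "a"], "a", 1)

def Spec_reorder_dense_candidates_with_quota (ranked_indices : List Int) (families : List String) (dominant_family : String) (dominant_quota : Int) (out : List Int) : Prop := out = reorder_dense_candidates_with_quota_alt ranked_indices families dominant_family dominant_quota
instance (ranked_indices : List Int) (families : List String) (dominant_family : String) (dominant_quota : Int) (out : List Int) : Decidable (Spec_reorder_dense_candidates_with_quota ranked_indices families dominant_family dominant_quota out) := by unfold Spec_reorder_dense_candidates_with_quota; infer_instance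

-- ===== CLAIM (what is proved, stated in full; the proofs are below) =====
def Claim_equal_reorder_dense_candidates_with_quota : Prop := ∀ (ranked_indices : List Int) (families : List String) (dominant_family : String) (dominant_quota : Int), Dom_reorder_dense_candidates_with_quota ranked_indices families dominant_family dominant_quota → Pre_reorder_dense_candidates_with_quota ranked_indices families dominant_family dominant_quota → Spec_reorder_dense_candidates_with_quota ranked_indices families dominant_family dominant_quota (reorder_dense_candidates_with_quota ranked_indices families dominant_family dominant_quota)

-- ===== LEMMAS AND PROOFS =====

-- the dominant-family test (shared shape of both ports' branch condition)
def pvD (families : List String) (dominant_family : String) (i : Int) : Bool :=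
  (PySem.List.pyGet? families i).getD "" == dominant_family

-- A's "leading" component, as structural recursion with the running taken-counter t
def pvL (f : List String) (fam : String) (q : Int) : List Int → Int → List Int
  | [], _ => []
  | x :: xs, t =>
    if pvD f fam x && decide (q ≤ t) then pvL f fam q xs t
    else x :: pvL f fam q xs (if pvD f fam x then t + 1 else t)

-- A's "deferred" component
def pvDf (f : List String) (fam : String) (q : Int) : List Int → Int → List Int
  | [], _ => []
  | x :: xs, t =>
    if pvD f fam x && decide (q ≤ t) then x :: pvDf f fam q xs t
    else pvDf f fam q xs (if pvD f fam x then t + 1 else t)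

-- A's final counter
def pvT (f : List String) (fam : String) (q : Int) : List Int → Int → Int
  | [], t => t
  | x :: xs, t =>
    if pvD f fam x && decide (q ≤ t) then pvT f fam q xs t
    else pvT f fam q xs (if pvD f fam x then t + 1 else t)

-- number of dominant elements of xs, as an Int
def pvCnt (f : List String) (fam : String) (xs : List Int) : Int :=
  ((xs.filter (pvD f fam)).length : Int)

theorem pvCnt_nonneg (f : List String) (fam : String) (xs : List Int) : 0 ≤ pvCnt f fam xs := by
  simp [pvCnt]

theorem pvCnt_append_singleton (f : List String) (fam : String) (xs : List Int) (x : Int) :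
    pvCnt f fam (xs ++ [x]) = pvCnt f fam xs + (if pvD f fam x then 1 else 0) := by
  by_cases hx : pvD f fam x = true <;> simp [pvCnt, List.filter_append, hx]

-- A's fold equals the (pvL, pvDf, pvT) decomposition
theorem pvFoldA_eq (f : List String) (fam : String) (q : Int) :
    ∀ (xs : List Int) (l df : List Int) (t : Int),
      xs.foldl (pvStepA f fam q) (l, df, t)
        = (l ++ pvL f fam q xs t, df ++ pvDf f fam q xs t, pvT f fam q xs t) := by
  intro xs
  induction xs with
  | nil => intro l df t; simp [pvL, pvDf, pvT]
  | cons x xs ih =>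
    intro l df t
    simp only [List.foldl_cons, pvStepA]
    by_cases h : (pvD f fam x && decide (q ≤ t)) = true
    · rw [if_pos (show (((PySem.List.pyGet? f x).getD "" == fam) && decide (q ≤ t)) = true from h)]
      rw [ih]
      simp only [pvL, pvDf, pvT]
      rw [if_pos h, if_pos h, if_pos h]
      simp
    · rw [if_neg (show ¬ ((((PySem.List.pyGet? f x).getD "" == fam) && decide (q ≤ t)) = true) from h)]
      rw [ih]
      simp only [pvL, pvDf, pvT]
      rw [if_neg h, if_neg h, if_neg h]
      simp [pvD]

-- pvL on a snoc: the last element survives iff it is not a dominant element beyond quota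
theorem pvL_append (f : List String) (fam : String) (q : Int) :
    ∀ (xs : List Int) (x : Int) (t : Int),
      pvL f fam q (xs ++ [x]) t
        = pvL f fam q xs t ++ (if pvD f fam x && decide (q ≤ t + pvCnt f fam xs) then [] else [x]) := by
  intro xs
  induction xs with
  | nil => intro x t; simp [pvL, pvCnt]
  | cons y xs ih =>
    intro x t
    have hc := pvCnt_nonneg f fam xs
    by_cases hy : pvD f fam y = true
    · by_cases ht : q ≤ t
      · have h1 : q ≤ t + pvCnt f fam xs := by omega
        have h2 : q ≤ t + pvCnt f fam (y :: xs) := by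
          have : pvCnt f fam (y :: xs) = pvCnt f fam xs + 1 := by simp [pvCnt, hy]
          omega
        simp [pvL, hy, ht, ih, h1, h2]
      · have hcnt : pvCnt f fam (y :: xs) = pvCnt f fam xs + 1 := by simp [pvCnt, hy]
        have harith : t + 1 + pvCnt f fam xs = t + pvCnt f fam (y :: xs) := by omega
        simp [pvL, hy, ht, ih, harith]
    · have hcnt : pvCnt f fam (y :: xs) = pvCnt f fam xs := by simp [pvCnt, hy]
      by_cases ht : q ≤ t <;> simp [pvL, hy, ht, ih, hcnt]

-- pvDf is a drop of the filtered list
theorem pvDf_eq_drop (f : List String) (fam : String) (q : Int) :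
    ∀ (xs : List Int) (t : Int),
      pvDf f fam q xs t = (xs.filter (pvD f fam)).drop (q - t).toNat := by
  intro xs
  induction xs with
  | nil => intro t; simp [pvDf]
  | cons x xs ih =>
    intro t
    by_cases hx : pvD f fam x = true
    · by_cases ht : q ≤ t
      · have h0 : (q - t).toNat = 0 := by omega
        simp [pvDf, hx, ht, ih, h0]
      · have h1 : (q - t).toNat = (q - (t + 1)).toNat + 1 := by omega
        simp [pvDf, hx, ht, ih, h1]
    · by_cases ht : q ≤ t <;> simp [pvDf, hx, ht, ih]

-- B's reverse pass with removal budget max 0 (t + cnt - q) computes pvL reversed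
theorem pvGoB_eq (f : List String) (fam : String) (q : Int) (t : Int) :
    ∀ (xs : List Int),
      pvGoB f fam xs.reverse (max 0 (t + pvCnt f fam xs - q)) = (pvL f fam q xs t).reverse := by
  intro xs
  induction xs using List.reverseRecOn with
  | nil => simp [pvGoB, pvL]
  | append_singleton xs x ih =>
    have hc := pvCnt_nonneg f fam xs
    rw [List.reverse_append]
    simp only [List.reverse_cons, List.reverse_nil, List.nil_append, List.cons_append]
    rw [pvCnt_append_singleton]
    by_cases hx : pvD f fam x = true
    · by_cases hge : q ≤ t + pvCnt f fam xs
      · have hr : max 0 (t + (pvCnt f fam xs + if pvD f fam x then 1 else 0) - q) ≠ 0 := by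
          simp [hx]; omega
        have hr1 : max 0 (t + (pvCnt f fam xs + if pvD f fam x then 1 else 0) - q) - 1
            = max 0 (t + pvCnt f fam xs - q) := by simp [hx]; omega
        rw [pvGoB]
        rw [if_pos (by rw [Bool.and_eq_true]; exact ⟨by simpa using hr, hx⟩)]
        rw [hr1, ih, pvL_append]
        simp [hx, hge]
      · have hr : max 0 (t + (pvCnt f fam xs + if pvD f fam x then 1 else 0) - q) = 0 := by
          simp [hx]; omega
        have hr0 : max 0 (t + pvCnt f fam xs - q) = 0 := by omega
        rw [pvGoB, hr]
        rw [if_neg (by simp)]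
        rw [hr0] at ih
        rw [ih, pvL_append]
        simp [hx, hge]
    · have hx' : pvD f fam x = false := by simpa using hx
      have hr : max 0 (t + (pvCnt f fam xs + if pvD f fam x then 1 else 0) - q)
          = max 0 (t + pvCnt f fam xs - q) := by simp [hx']
      rw [pvGoB, hr]
      rw [if_neg (by simp [show ((PySem.List.pyGet? f x).getD "" == fam) = false from hx'])]
      rw [ih, pvL_append]
      simp [hx']

-- ===== VERDICT (by name: the statement is the Claim_ definition above) =====
theorem reorder_dense_candidates_with_quota_spec : Claim_equal_reorder_dense_candidates_with_quota := by
  intro ranked families fam q _ _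
  unfold Spec_reorder_dense_candidates_with_quota
  unfold reorder_dense_candidates_with_quota reorder_dense_candidates_with_quota_alt
  by_cases hg : q ≤ 0 ∨ ranked = []
  · simp [hg]
  · rw [if_neg hg, if_neg hg]
    push Not at hg
    obtain ⟨hq, _⟩ := hg
    simp only []
    rw [pvFoldA_eq]
    simp only [List.nil_append]
    -- deferred sides
    have hdom : ranked.filter (fun i => (PySem.List.pyGet? families i).getD "" == fam)
        = ranked.filter (pvD families fam) := rfl
    have hslice : PySem.List.slice (ranked.filter (pvD families fam)) (some q) none
        = (ranked.filter (pvD families fam)).drop q.toNat :=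
      PySem.List.slice_from _ (by omega)
    have hdf : pvDf families fam q ranked 0
        = (ranked.filter (pvD families fam)).drop q.toNat := by
      rw [pvDf_eq_drop]; norm_num
    -- leading sides
    have hr : (((ranked.filter (pvD families fam)).drop q.toNat).length : Int)
        = max 0 (0 + pvCnt families fam ranked - q) := by
      simp [pvCnt, List.length_drop]
      omega
    rw [hdom, hslice, hr, pvGoB_eq families fam q 0 ranked, List.reverse_reverse, hdf]
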